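-- pv_equiv track=rewrite | github.com/ZhouRUNLIN/HOMEWORK_Sor | LU3IN003-Algo/codes/projet.py | align_letter_word
-- ===== SOURCE A (Python) =====
-- def align_letter_word(x:str,y:str):
--     """
--     Q22
--     Etant donné y un mot de longueur 1 et x un mot non vide de longueur quelconque, renvoie un meilleur alignement de (x, y).
--     """
--     dmin=4
--     p=0
--     for i in range(len(x)):
--         if x[i]==y[0]:
--             dmin=0
--             p=i
--         elif (x[i]=='C' and y[0]=='G') or (x[i]=='G' and y[0]=='C') or (x[i]=='A' and y[0]=='T') or (x[i]=='T' and y[0]=='A'):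
--             if dmin>3:
--                 dmin=3
--                 p=i
--     return "-"*p+y[0]+"-"*(len(x)-p-1)
-- ===== SOURCE B (Python) =====
-- def align_letter_word(x: str, y: str):
--     """Two library searches instead of the combined tracking loop:
--     last exact match wins; otherwise first complementary-base match; otherwise 0."""
--     p = x.rfind(y[0])
--     if p == -1:
--         comp = {'A': 'T', 'T': 'A', 'C': 'G', 'G': 'C'}.get(y[0])
--         p = x.find(comp) if comp else -1
--         if p == -1:
--             p = 0
--     return "-"*p + y[0] + "-"*(len(x)-p-1)
-- ===== Notes on version B (the rewrite author's own statement) =====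
-- stated objective: idiomatic
-- what changed: A's single loop tracking (dmin, p) is replaced by two library searches: x.rfind(y[0]) for the last exact match, then x.find(complement-of-y[0] looked up in a dict) for the first complementary base, falling through to 0.
import Mathlib
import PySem

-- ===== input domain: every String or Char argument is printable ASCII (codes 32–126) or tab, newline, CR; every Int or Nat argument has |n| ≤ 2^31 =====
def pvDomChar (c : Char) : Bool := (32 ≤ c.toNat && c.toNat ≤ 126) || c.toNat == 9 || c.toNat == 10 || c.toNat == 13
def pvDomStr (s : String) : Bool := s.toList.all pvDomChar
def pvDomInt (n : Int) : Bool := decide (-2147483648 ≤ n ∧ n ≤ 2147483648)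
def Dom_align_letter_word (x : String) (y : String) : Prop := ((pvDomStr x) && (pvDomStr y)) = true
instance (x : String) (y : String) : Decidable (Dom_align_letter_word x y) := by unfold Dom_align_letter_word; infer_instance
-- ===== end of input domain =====

-- B replaces A's combined dmin/p tracking loop by two library searches (rfind for the
-- last exact match, find for the first complementary base) with a fall-through to 0 — objective: idiomatic.

-- ===== PORT A =====
-- the elif condition of A's loop
def pvIsComp (a c : Char) : Bool :=
  (a == 'C' && c == 'G') || (a == 'G' && c == 'C') || (a == 'A' && c == 'T') || (a == 'T' && c == 'A')

-- A's for-loop over range(len(x)) carrying (dmin, p)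
def pvLoopA (c : Char) : List Char → Int → Int × Int → Int × Int
  | [], _, st => st
  | a :: t, i, (dmin, p) =>
    if a == c then pvLoopA c t (i + 1) (0, i)
    else if pvIsComp a c then
      (if dmin > 3 then pvLoopA c t (i + 1) (3, i) else pvLoopA c t (i + 1) (dmin, p))
    else pvLoopA c t (i + 1) (dmin, p)

-- the shared final line of both Pythons: "-"*p + y[0] + "-"*(len(x)-p-1)
def pvTail (x : String) (c : Char) (p : Int) : String :=
  String.ofList (PySem.List.pyRepeat ['-'] p ++ [c] ++
             PySem.List.pyRepeat ['-'] ((x.toList.length : Int) - p - 1))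

def align_letter_word (x : String) (y : String) : String :=
  match y.toList with
  | [] => ""   -- Python raises IndexError on y[0]; excluded by Pre_
  | c :: _ =>
    let st := pvLoopA c x.toList 0 (4, 0)
    pvTail x c st.2

-- ===== PORT B =====
-- {'A':'T','T':'A','C':'G','G':'C'}
def pvCompDict : PySem.Dict Char Char :=
  PySem.Dict.ofList [('A', 'T'), ('T', 'A'), ('C', 'G'), ('G', 'C')]

def align_letter_word_alt (x : String) (y : String) : String :=
  match y.toList with
  | [] => ""   -- Python raises IndexError on y[0]; excluded by Pre_
  | c :: _ =>
    let p0 := PySem.Str.rfind x (String.singleton c)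
    let p :=
      if p0 = -1 then
        let comp := PySem.Dict.get? pvCompDict c
        let p1 := match comp with
          | some d => PySem.Str.find x (String.singleton d)
          | none => -1
        if p1 = -1 then 0 else p1
      else p0
    pvTail x c p

-- ===== PRECONDITION & SPEC =====
-- A evaluates y[0]: the empty y (IndexError) is excluded; every other input returns.
def Pre_align_letter_word (x : String) (y : String) : Prop := y ≠ ""
instance (x : String) (y : String) : Decidable (Pre_align_letter_word x y) := by
  unfold Pre_align_letter_word; infer_instance
def pvWitness_align_letter_word : String × String := ("xACGT", "G")

def Spec_align_letter_word (x : String) (y : String) (out : String) : Prop :=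
  out = align_letter_word_alt x y
instance (x : String) (y : String) (out : String) : Decidable (Spec_align_letter_word x y out) := by
  unfold Spec_align_letter_word; infer_instance

-- ===== CLAIM (what is proved, stated in full; the proofs are below) =====
def Claim_equal_align_letter_word : Prop := ∀ (x : String) (y : String),
  Dom_align_letter_word x y → Pre_align_letter_word x y →
  Spec_align_letter_word x y (align_letter_word x y)

-- ===== LEMMAS AND PROOFS =====

-- the complement base of c, if c is a base
def pvCompChar? (c : Char) : Option Char :=
  if c = 'G' then some 'C' else if c = 'C' then some 'G'
  else if c = 'T' then some 'A' else if c = 'A' then some 'T' else none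

-- index of the last occurrence of c
def pvLastIdx? (c : Char) : List Char → Option Nat
  | [] => none
  | a :: t =>
    match pvLastIdx? c t with
    | some j => some (j + 1)
    | none => if a = c then some 0 else none

-- index of the first occurrence of c
def pvFirstIdx? (c : Char) : List Char → Option Nat
  | [] => none
  | a :: t => if a = c then some 0 else (pvFirstIdx? c t).map (· + 1)

-- index of the first complementary base
def pvFirstComp? (c : Char) : List Char → Option Nat
  | [] => none
  | a :: t => if pvIsComp a c then some 0 else (pvFirstComp? c t).map (· + 1)

theorem pvIsComp_eq (a c : Char) :
    pvIsComp a c = match pvCompChar? c with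
      | some d => a == d
      | none => false := by
  unfold pvCompChar?
  split_ifs with h1 h2 h3 h4 <;> subst_vars <;> simp [pvIsComp] <;> try tauto

theorem pvFirstComp?_eq (c : Char) (l : List Char) :
    pvFirstComp? c l = match pvCompChar? c with
      | some d => pvFirstIdx? d l
      | none => none := by
  induction l with
  | nil => cases h : pvCompChar? c <;> simp [pvFirstComp?, pvFirstIdx?, h]
  | cons a t ih =>
    cases h : pvCompChar? c <;>
      simp [pvFirstComp?, pvFirstIdx?, pvIsComp_eq, h, ih] at * <;>
      split_ifs <;> simp_all [beq_iff_eq, eq_comm]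

-- A's loop: last exact match wins; otherwise (while dmin is still 4) the first complementary match
theorem pvLoopA_spec (c : Char) (t : List Char) : ∀ (i d p : Int),
    (pvLoopA c t i (d, p)).2 =
      match pvLastIdx? c t with
      | some j => i + j
      | none =>
        if d > 3 then
          match pvFirstComp? c t with
          | some j => i + j
          | none => p
        else p := by
  induction t with
  | nil => intro i d p; simp [pvLoopA, pvLastIdx?, pvFirstComp?]
  | cons a t ih =>
    intro i d p
    by_cases hac : a = c
    · subst hac
      simp only [pvLoopA, beq_self_eq_true, if_true, ih, pvLastIdx?]
      cases h : pvLastIdx? a t <;> simp [h] <;> push_cast <;> ring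
    · by_cases hcomp : pvIsComp a c = true
      · by_cases hd : d > 3
        · simp only [pvLoopA, beq_iff_eq, hac, if_false, hcomp, if_true, hd, ih,
            pvLastIdx?, pvFirstComp?]
          cases h : pvLastIdx? c t <;> simp [h, hac] <;> push_cast <;> try ring
        · simp only [pvLoopA, beq_iff_eq, hac, if_false, hcomp, if_true, hd, ih,
            pvLastIdx?, pvFirstComp?]
          cases h : pvLastIdx? c t <;> simp [h, hac, hd] <;> push_cast <;> try ring
      · simp only [pvLoopA, beq_iff_eq, hac, if_false, hcomp, ih, pvLastIdx?, pvFirstComp?]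
        cases h : pvLastIdx? c t <;> cases h2 : pvFirstComp? c t <;>
          simp [h, h2, hac, hcomp] <;> (try simp [ih, h, h2]) <;> (try split_ifs) <;>
          (try push_cast) <;> (try ring)

theorem pvFind_go_singleton (c : Char) (l : List Char) : ∀ (k : Nat),
    PySem.Chars.find.go [c] l k = match pvFirstIdx? c l with
      | some j => ((k + j : Nat) : Int)
      | none => -1 := by
  induction l with
  | nil => intro k; simp [PySem.Chars.find.go, pvFirstIdx?]
  | cons a t ih =>
    intro k
    by_cases hac : a = c
    · subst hac; simp [PySem.Chars.find.go, pvFirstIdx?, List.isPrefixOf]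
    · simp only [PySem.Chars.find.go, pvFirstIdx?, List.isPrefixOf, hac]
      cases h : pvFirstIdx? c t <;>
        simp [ih, h, hac, List.isPrefixOf, Bool.and_eq_true, beq_iff_eq] <;> (try push_cast) <;>
        (try ring) <;>
        (first | exact fun hh => hac hh.symm | rw [if_neg (fun hh => hac hh.symm)] | skip)

-- Python's s.find(d) for a one-character needle is the first index of d
theorem pvFind_singleton (l : List Char) (c : Char) :
    PySem.Chars.find l [c] = match pvFirstIdx? c l with
      | some j => (j : Int)
      | none => -1 := by
  simp [PySem.Chars.find, pvFind_go_singleton]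

theorem pvSingleton_isPrefixOf (c : Char) (xs : List Char) :
    [c].isPrefixOf xs = (xs.head? == some c) := by
  cases xs <;> simp [List.isPrefixOf, BEq.comm]

theorem pvLastIdx?_append_singleton (c a : Char) (t : List Char) :
    pvLastIdx? c (t ++ [a]) = if a = c then some t.length else pvLastIdx? c t := by
  induction t with
  | nil => simp [pvLastIdx?]
  | cons b t ih =>
    simp only [List.cons_append, pvLastIdx?, ih, List.length_cons]
    split_ifs <;> cases h : pvLastIdx? c t <;> simp [h]

theorem pvRfind_go_singleton (c : Char) (l : List Char) : ∀ (n : Nat),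
    PySem.Chars.rfind.go l [c] n = match pvLastIdx? c (l.take (n + 1)) with
      | some j => (j : Int)
      | none => -1 := by
  intro n
  induction n with
  | zero =>
    rw [PySem.Chars.rfind.go]
    rw [pvSingleton_isPrefixOf]
    cases l with
    | nil => simp [pvLastIdx?]
    | cons a t =>
      simp only [List.take_succ_cons, List.take_zero, pvLastIdx?, List.head?_cons]
      by_cases hac : a = c <;> simp [hac] <;> exact fun hh => hac hh.symm
  | succ n ih =>
    rw [PySem.Chars.rfind.go]
    rw [pvSingleton_isPrefixOf, List.head?_drop]
    rw [show l.take (n + 1 + 1) = l.take (n + 1) ++ (l[n + 1]?).toList from List.take_succ]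
    cases h : l[n + 1]? with
    | none => simp [h, ih]
    | some a =>
      simp only [h, Option.toList_some, pvLastIdx?_append_singleton]
      have hlen : (l.take (n + 1)).length = n + 1 := by
        have : n + 1 < l.length := (List.getElem?_eq_some_iff.mp h).1
        simp [List.length_take, Nat.min_eq_left (Nat.le_of_lt this)]
      by_cases hac : a = c
      · simp [hac, hlen]
      · simp [hac, ih]
        (try exact fun hh => hac hh.symm)

-- Python's s.rfind(c) for a one-character needle is the last index of c
theorem pvRfind_singleton (l : List Char) (c : Char) :
    PySem.Chars.rfind l [c] = match pvLastIdx? c l with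
      | some j => (j : Int)
      | none => -1 := by
  rw [PySem.Chars.rfind, pvRfind_go_singleton]
  rw [List.take_of_length_le (by omega)]

theorem pvCompDict_get? (c : Char) : PySem.Dict.get? pvCompDict c = pvCompChar? c := by
  unfold pvCompDict pvCompChar?
  simp [PySem.Dict.ofList, PySem.Dict.update, PySem.Dict.empty, PySem.Dict.insert,
        PySem.Dict.get?_mk_cons, PySem.Dict.get?]
  simp only [List.find?]
  by_cases h1 : c = 'A' <;> by_cases h2 : c = 'T' <;> by_cases h3 : c = 'C' <;>
    by_cases h4 : c = 'G' <;> subst_vars <;> simp_all <;>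
    (try
      (have e1 : ('A' == c) = false := by simp [Ne.symm h1]
       have e2 : ('T' == c) = false := by simp [Ne.symm h2]
       have e3 : ('C' == c) = false := by simp [Ne.symm h3]
       have e4 : ('G' == c) = false := by simp [Ne.symm h4]
       simp [e1, e2, e3, e4]))

theorem pvMain (x y : String) (hy : y ≠ "") :
    align_letter_word x y = align_letter_word_alt x y := by
  unfold align_letter_word align_letter_word_alt
  cases hcl : y.toList with
  | nil => simp
  | cons c rest =>
    simp only
    congr 1
    rw [pvLoopA_spec]
    have hr : PySem.Str.rfind x (String.singleton c) = PySem.Chars.rfind x.toList [c] := by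
      simp [PySem.Str.rfind_eq]
    rw [hr, pvRfind_singleton, pvCompDict_get?]
    cases hL : pvLastIdx? c x.toList with
    | some j => simp
    | none =>
      simp only [if_pos rfl]
      cases hC : pvCompChar? c with
      | none =>
        have : pvFirstComp? c x.toList = none := by rw [pvFirstComp?_eq, hC]
        simp [this]
      | some d =>
        have hf : PySem.Str.find x (String.singleton d) = PySem.Chars.find x.toList [d] := by
          simp [PySem.Str.find_eq]
        have hfc : pvFirstComp? c x.toList = pvFirstIdx? d x.toList := by
          rw [pvFirstComp?_eq, hC]
        simp only [show (match some d with
          | some d => PySem.Str.find x (String.singleton d)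
          | none => (-1 : Int)) = PySem.Str.find x (String.singleton d) from rfl]
        rw [hf, pvFind_singleton, hfc]
        cases hF : pvFirstIdx? d x.toList with
        | some j => simp
        | none => simp

-- ===== VERDICT =====
theorem align_letter_word_spec : Claim_equal_align_letter_word := by
  intro x y _ hy
  exact pvMain x y hy
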